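-- pv_equiv track=rewrite | github.com/miliar/Code_Jam_Webscraper | solutions_python/Problem_201/2261.py | interval_frequencies
-- ===== SOURCE A (Python) =====
-- import math
--
-- def relevant_cases(N):
--     rel_cases = {N}
--     while (N - 1) % 2 == 0:
--         N = int((N - 1) / 2)
--         rel_cases = rel_cases | {N}
--     if N == 1:
--         rel_cases = rel_cases | {1, 0}
--         rel_cases_lst = list(rel_cases)
--         rel_cases_lst.sort()
--         return rel_cases
--     else:
--         while N >= 3:
--             case1 = int(math.floor((N - 1.0) / 2))
--             case2 = int(math.ceil((N - 1.0) / 2))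
--             rel_cases = rel_cases | { case1 } | { case2 }
--             if case1 % 2 == 0:
--                 N = case1
--             else:
--                 N = case2
--         rel_cases = rel_cases | {1, 0}
--         rel_cases_lst = list(rel_cases)
--         rel_cases_lst.sort()
--         return rel_cases_lst
--
-- def interval_frequencies(N):
--     interval_lengths = relevant_cases(N)
--     freqs = { int_length : 0 for int_length in interval_lengths }
--     freqs[N] = 1
--     for length in interval_lengths[:0:-1]:
--         freqs[math.floor((length - 1)/2)] = freqs[math.floor((length - 1)/2)] + freqs[length]
--         freqs[math.ceil((length - 1)/2)] = freqs[math.ceil((length - 1)/2)] + freqs[length]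
--     return freqs
-- ===== SOURCE B (Python) =====
-- def interval_frequencies(N):
--     # Single memoized recursion: contribution(L) maps each length reachable from L
--     # by repeated splitting to the number of splitting paths from L to it.
--     memo = {}
--
--     def contribution(L):
--         if L in memo:
--             return memo[L]
--         if L == 0:
--             res = {0: 1}
--         else:
--             res = {L: 1}
--             for child in ((L - 1) // 2, L // 2):  # floor and ceil of (L-1)/2; both counted even when equal
--                 for k, v in contribution(child).items():
--                     res[k] = res.get(k, 0) + v
--         memo[L] = res
--         return res
--
--     freqs = dict(contribution(N))
--     freqs.setdefault(1, 0)
--     freqs.setdefault(0, 0)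
--     return {k: freqs[k] for k in sorted(freqs)}
-- ===== Notes on version B (the rewrite author's own statement) =====
-- stated objective: alternative
-- what changed: Replaces A's two-phase design (enumerate the relevant lengths with two while-loops, then run a descending DP pass over the sorted list) by a single memoized recursion contribution(L) that directly merges the path-count dicts of the two children, then fills in the two always-present smallest keys and sorts the keys.
import Mathlib
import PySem

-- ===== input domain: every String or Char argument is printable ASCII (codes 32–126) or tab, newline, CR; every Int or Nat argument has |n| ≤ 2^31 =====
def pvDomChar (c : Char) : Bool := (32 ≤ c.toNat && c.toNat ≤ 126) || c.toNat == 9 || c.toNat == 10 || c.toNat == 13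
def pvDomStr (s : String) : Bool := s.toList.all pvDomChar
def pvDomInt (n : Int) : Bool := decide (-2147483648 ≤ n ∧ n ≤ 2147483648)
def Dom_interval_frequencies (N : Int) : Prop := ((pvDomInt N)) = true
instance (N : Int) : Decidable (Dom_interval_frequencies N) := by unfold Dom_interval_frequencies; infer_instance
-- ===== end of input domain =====

-- ===== PORT A =====
-- B rewrites A's two-phase design (enumerate relevant lengths, then a descending DP pass)
-- as one memoized recursion merging child dictionaries; equal return value on 0 <= N.

-- math.floor((L - 1)/2) : exact for |L| <= 2^31 (float division is exact there)
def pvFloorHalf (L : Int) : Int := PySem.Int.floordiv (L - 1) 2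
-- math.ceil((L - 1)/2) : exact for |L| <= 2^31
def pvCeilHalf (L : Int) : Int := -(PySem.Int.floordiv (-(L - 1)) 2)

-- while (N - 1) % 2 == 0: N = int((N - 1)/2); rel_cases |= {N}
-- (int((N-1)/2) = (N-1)//2 since N-1 is even; fuel only makes the loop total,
--  it is never exhausted when 0 <= N)
def pvLoop1 : Nat → Int → PySem.Set Int → Int × PySem.Set Int
  | 0, n, s => (n, s)
  | fuel + 1, n, s =>
    if PySem.Int.mod (n - 1) 2 = 0 then
      let n' := PySem.Int.floordiv (n - 1) 2
      pvLoop1 fuel n' (PySem.Set.add s n')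
    else (n, s)

-- while N >= 3: case1 = floor((N-1)/2); case2 = ceil((N-1)/2); rel_cases |= {case1,case2}; …
def pvLoop2 : Nat → Int → PySem.Set Int → PySem.Set Int
  | 0, _, s => s
  | fuel + 1, n, s =>
    if 3 ≤ n then
      let case1 := pvFloorHalf n
      let case2 := pvCeilHalf n
      let s' := PySem.Set.add (PySem.Set.add s case1) case2
      let n' := if PySem.Int.mod case1 2 = 0 then case1 else case2
      pvLoop2 fuel n' s'
    else s

def relevantCases (N : Int) : List Int :=
  let p := pvLoop1 (N.toNat + 2) N (PySem.Set.ofList [N])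
  if p.1 = 1 then
    -- Python returns the raw SET here and the caller then raises TypeError on slicing;
    -- this branch is unreachable whenever the first while loop terminates (it exits on
    -- an even value), in particular on all of Pre_; ported as the sorted list.
    PySem.List.sorted (PySem.Set.add (PySem.Set.add p.2 1) 0) (fun x => x) false
  else
    let s2 := pvLoop2 (N.toNat + 2) p.1 p.2
    PySem.List.sorted (PySem.Set.add (PySem.Set.add s2 1) 0) (fun x => x) false

def interval_frequencies (N : Int) : List (Int × Int) :=
  let lens := relevantCases N
  let d0 : PySem.Dict Int Int := lens.foldl (fun d k => d.insert k 0) PySem.Dict.empty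
  let d1 := d0.insert N 1
  match PySem.List.slice? lens none (some 0) (-1) with    -- lens[:0:-1]
  | none => []                                            -- unreachable (step ≠ 0)
  | some rev =>
    let r := rev.foldl (fun (od : Option (PySem.Dict Int Int)) L =>
      od.bind (fun d =>
        match d.get? (pvFloorHalf L), d.get? L with       -- KeyError → none
        | some a, some b =>
          let d' := d.insert (pvFloorHalf L) (a + b)
          match d'.get? (pvCeilHalf L), d'.get? L with    -- KeyError → none
          | some a2, some b2 => some (d'.insert (pvCeilHalf L) (a2 + b2))
          | _, _ => none
        | _, _ => none)) (some d1)
    match r with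
    | some d => d.items
    | none => []                                          -- KeyError: excluded by Pre_

-- ===== PORT B =====
-- for k, v in src.items(): res[k] = res.get(k, 0) + v
def pvMerge (res src : PySem.Dict Int Int) : PySem.Dict Int Int :=
  src.items.foldl (fun d kv => d.insert kv.1 (d.getD kv.1 0 + kv.2)) res

-- contribution(L) with the memo dict threaded through; fuel only makes it total
-- (never exhausted when 0 ≤ L and fuel ≥ L.toNat + 1)
def pvContrib : Nat → PySem.Dict Int (PySem.Dict Int Int) → Int →
    PySem.Dict Int Int × PySem.Dict Int (PySem.Dict Int Int)
  | fuel, memo, L =>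
    match memo.get? L with
    | some r => (r, memo)
    | none =>
      match fuel with
      | 0 => (PySem.Dict.empty, memo)
      | fuel + 1 =>
        let p :=
          if L = 0 then (PySem.Dict.ofList [(0, 1)], memo)
          else
            let p1 := pvContrib fuel memo (PySem.Int.floordiv (L - 1) 2)
            let p2 := pvContrib fuel p1.2 (PySem.Int.floordiv L 2)
            (pvMerge (pvMerge (PySem.Dict.ofList [(L, 1)]) p1.1) p2.1, p2.2)
        (p.1, p.2.insert L p.1)

def interval_frequencies_alt (N : Int) : List (Int × Int) :=
  let d := (pvContrib (N.toNat + 1) PySem.Dict.empty N).1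
  let d := d.setdefault 1 0
  let d := d.setdefault 0 0
  (PySem.List.sorted d.keys (fun x => x) false).map (fun k => (k, d.getD k 0))

-- ===== PRECONDITION & SPEC =====
-- Pre_ excludes N < 0: there A raises KeyError in the propagation loop (and loops forever at N = -1).
def Pre_interval_frequencies (N : Int) : Prop := 0 ≤ N
instance (N : Int) : Decidable (Pre_interval_frequencies N) := by unfold Pre_interval_frequencies; infer_instance
def pvWitness_interval_frequencies : Int := (12)
def Spec_interval_frequencies (N : Int) (out : List (Int × Int)) : Prop := out = interval_frequencies_alt N
instance (N : Int) (out : List (Int × Int)) : Decidable (Spec_interval_frequencies N out) := by unfold Spec_interval_frequencies; infer_instance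

-- ===== CLAIM (what is proved, stated in full; the proofs are below) =====
def Claim_equal_interval_frequencies : Prop := ∀ (N : Int), Dom_interval_frequencies N → Pre_interval_frequencies N → Spec_interval_frequencies N (interval_frequencies N)

-- ===== LEMMAS AND PROOFS =====
-- ===== proof-side helpers =====
def ch1 (L : Int) : Int := PySem.Int.floordiv (L - 1) 2
def ch2 (L : Int) : Int := PySem.Int.floordiv L 2

theorem fd2 (a : Int) : PySem.Int.floordiv a 2 = a / 2 :=
  PySem.Int.floordiv_eq_ediv_of_pos (by norm_num)

theorem pvCeilHalf_eq (L : Int) : pvCeilHalf L = ch2 L := by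
  unfold pvCeilHalf ch2; rw [fd2, fd2]; omega

theorem ch1_lt (L : Int) (h : 1 ≤ L) : 0 ≤ ch1 L ∧ ch1 L < L := by
  unfold ch1; rw [fd2]; omega

theorem ch2_lt (L : Int) (h : 1 ≤ L) : 0 ≤ ch2 L ∧ ch2 L < L := by
  unfold ch2; rw [fd2]; omega

-- number of splitting paths from L to k (both children counted, also when equal)
def pcF (L k : Int) : Int :=
  if 1 ≤ L then
    if k = L then 1 else pcF (ch1 L) k + pcF (ch2 L) k
  else if k = L then 1 else 0
termination_by L.toNat
decreasing_by
  all_goals simp only [ch1, ch2, fd2]; omega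

-- k is reachable from L by repeated splitting
def reachF (L v : Int) : Bool :=
  if 1 ≤ L then decide (v = L) || reachF (ch1 L) v || reachF (ch2 L) v
  else decide (v = L)
termination_by L.toNat
decreasing_by
  all_goals simp only [ch1, ch2, fd2]; omega

-- paths from L to k all of whose vertices except the last are ≥ t
def pcGE (t L k : Int) : Int :=
  if k = L then 1
  else if 1 ≤ L ∧ t ≤ L then pcGE t (ch1 L) k + pcGE t (ch2 L) k
  else 0
termination_by L.toNat
decreasing_by
  all_goals simp only [ch1, ch2, fd2]; omega

theorem pcF_unfold (L k : Int) (h : 1 ≤ L) :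
    pcF L k = if k = L then 1 else pcF (ch1 L) k + pcF (ch2 L) k := by
  rw [pcF]; simp [h]

theorem pcF_base (L k : Int) (h : ¬ 1 ≤ L) : pcF L k = if k = L then 1 else 0 := by
  rw [pcF]; simp [h]

theorem reachF_unfold (L v : Int) (h : 1 ≤ L) :
    reachF L v = (decide (v = L) || reachF (ch1 L) v || reachF (ch2 L) v) := by
  rw [reachF]; simp [h]

theorem reachF_base (L v : Int) (h : ¬ 1 ≤ L) : reachF L v = decide (v = L) := by
  rw [reachF]; simp [h]

theorem reachF_self (L : Int) : reachF L L = true := by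
  by_cases h : 1 ≤ L
  · rw [reachF_unfold L L h]; simp
  · rw [reachF_base L L h]; simp

theorem reachF_le (L v : Int) (h : reachF L v = true) : v ≤ L ∧ (0 ≤ L → 0 ≤ v) := by
  by_cases h1 : 1 ≤ L
  · rw [reachF_unfold L v h1] at h
    simp only [Bool.or_eq_true, decide_eq_true_eq] at h
    rcases h with (h | h) | h
    · omega
    · have := reachF_le (ch1 L) v h
      have := ch1_lt L h1; omega
    · have := reachF_le (ch2 L) v h
      have := ch2_lt L h1; omega
  · rw [reachF_base L v h1] at h
    simp only [decide_eq_true_eq] at h; omega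
termination_by L.toNat
decreasing_by all_goals simp only [ch1, ch2, fd2]; omega

theorem reachF_trans (a b c : Int) (h1 : reachF a b = true) (h2 : reachF b c = true) :
    reachF a c = true := by
  by_cases ha : 1 ≤ a
  · rw [reachF_unfold a b ha] at h1
    simp only [Bool.or_eq_true, decide_eq_true_eq] at h1
    rw [reachF_unfold a c ha]
    simp only [Bool.or_eq_true, decide_eq_true_eq]
    rcases h1 with (h1 | h1) | h1
    · rw [h1] at h2
      rw [reachF_unfold a c ha] at h2
      simp only [Bool.or_eq_true, decide_eq_true_eq] at h2
      tauto
    · exact Or.inl (Or.inr (reachF_trans _ _ _ h1 h2))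
    · exact Or.inr (reachF_trans _ _ _ h1 h2)
  · rw [reachF_base a b ha] at h1
    simp only [decide_eq_true_eq] at h1; subst h1; exact h2
termination_by a.toNat
decreasing_by all_goals simp only [ch1, ch2, fd2]; omega

theorem reachF_ch1 (L : Int) (h : 1 ≤ L) : reachF L (ch1 L) = true := by
  rw [reachF_unfold L _ h]; simp [reachF_self]

theorem reachF_ch2 (L : Int) (h : 1 ≤ L) : reachF L (ch2 L) = true := by
  rw [reachF_unfold L _ h]; simp [reachF_self]

theorem pcF_eq_zero (L k : Int) (h : reachF L k = false) : pcF L k = 0 := by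
  by_cases h1 : 1 ≤ L
  · rw [reachF_unfold L k h1] at h
    simp only [Bool.or_eq_false_iff, decide_eq_false_iff_not] at h
    rw [pcF_unfold L k h1]
    rw [if_neg h.1.1, pcF_eq_zero _ _ h.1.2, pcF_eq_zero _ _ h.2]
    norm_num
  · rw [reachF_base L k h1] at h
    simp only [decide_eq_false_iff_not] at h
    rw [pcF_base L k h1, if_neg h]
termination_by L.toNat
decreasing_by all_goals simp only [ch1, ch2, fd2]; omega

theorem pcGE_unfold (t L k : Int) :
    pcGE t L k = if k = L then 1
      else if 1 ≤ L ∧ t ≤ L then pcGE t (ch1 L) k + pcGE t (ch2 L) k else 0 := by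
  rw [pcGE]

theorem pcGE_of_lt (t L k : Int) (h : L < t) : pcGE t L k = if k = L then 1 else 0 := by
  rw [pcGE_unfold]; split_ifs with h1 h2 <;> first | rfl | omega

theorem pcGE_one_eq_pcF (L k : Int) : pcGE 1 L k = pcF L k := by
  by_cases h1 : 1 ≤ L
  · rw [pcGE_unfold, pcF_unfold L k h1, if_pos (by omega : 1 ≤ L ∧ (1:Int) ≤ L)]
    rw [pcGE_one_eq_pcF, pcGE_one_eq_pcF]
  · rw [pcGE_unfold, pcF_base L k h1, if_neg (by omega : ¬(1 ≤ L ∧ (1:Int) ≤ L))]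
termination_by L.toNat
decreasing_by all_goals simp only [ch1, ch2, fd2]; omega

-- number of direct edges from j to k
def edg (j k : Int) : Int := (if ch1 j = k then 1 else 0) + (if ch2 j = k then 1 else 0)

theorem pcGE_zero_of_lt (t L k : Int) (h : L < t) (hk : k ≠ L) : pcGE t L k = 0 := by
  rw [pcGE_of_lt t L k h, if_neg hk]

theorem pcGE_peel (j L k : Int) (hj : 1 ≤ j) :
    pcGE j L k = pcGE (j+1) L k + edg j k * pcGE (j+1) L j := by
  by_cases hkL : k = L
  · subst hkL
    rw [pcGE_unfold j k k, if_pos rfl, pcGE_unfold (j+1) k k, if_pos rfl]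
    by_cases he : edg j k = 0
    · rw [he]; ring
    · have hlt : k < j := by
        unfold edg at he
        have h1 := ch1_lt j hj
        have h2 := ch2_lt j hj
        by_cases e1 : ch1 j = k <;> by_cases e2 : ch2 j = k <;>
          simp [e1, e2] at he <;> omega
      rw [pcGE_zero_of_lt (j+1) k j (by omega) (by omega)]; ring
  · by_cases hjL : j = L
    · subst hjL
      rw [pcGE_unfold j j k, if_neg hkL, if_pos (by omega : 1 ≤ j ∧ j ≤ j)]
      rw [pcGE_unfold (j+1) j k, if_neg hkL, if_neg (by omega : ¬(1 ≤ j ∧ j + 1 ≤ j))]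
      rw [pcGE_unfold (j+1) j j, if_pos rfl]
      have h1 := ch1_lt j hj
      have h2 := ch2_lt j hj
      rw [pcGE_of_lt j (ch1 j) k (by omega), pcGE_of_lt j (ch2 j) k (by omega)]
      unfold edg
      split_ifs with e1 e2 e3 e4 e5 e6 e7 <;> omega
    · by_cases hG : 1 ≤ L ∧ j ≤ L
      · have hG' : 1 ≤ L ∧ j + 1 ≤ L := by omega
        rw [pcGE_unfold j L k, if_neg hkL, if_pos hG]
        rw [pcGE_unfold (j+1) L k, if_neg hkL, if_pos hG']
        rw [pcGE_unfold (j+1) L j, if_neg (by omega : ¬ j = L), if_pos hG']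
        rw [pcGE_peel j (ch1 L) k hj, pcGE_peel j (ch2 L) k hj]
        ring
      · rw [pcGE_unfold j L k, if_neg hkL, if_neg hG]
        rw [pcGE_unfold (j+1) L k, if_neg hkL, if_neg (by omega : ¬(1 ≤ L ∧ j + 1 ≤ L))]
        rw [pcGE_unfold (j+1) L j, if_neg (by omega : ¬ j = L),
            if_neg (by omega : ¬(1 ≤ L ∧ j + 1 ≤ L))]
        ring
termination_by L.toNat
decreasing_by all_goals simp only [ch1, ch2, fd2]; omega

theorem pcGE_gap (a b L k : Int) (hab : a ≤ b)
    (hw : ∀ v, a ≤ v → v < b → reachF L v = false) : pcGE a L k = pcGE b L k := by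
  by_cases hkL : k = L
  · rw [pcGE_unfold a L k, if_pos hkL, pcGE_unfold b L k, if_pos hkL]
  · have hL : ¬ (a ≤ L ∧ L < b) := by
      intro h
      have := hw L h.1 h.2
      rw [reachF_self L] at this; exact absurd this (by simp)
    by_cases hG : 1 ≤ L ∧ a ≤ L
    · have hG' : 1 ≤ L ∧ b ≤ L := by omega
      rw [pcGE_unfold a L k, if_neg hkL, if_pos hG]
      rw [pcGE_unfold b L k, if_neg hkL, if_pos hG']
      have hw1 : ∀ v, a ≤ v → v < b → reachF (ch1 L) v = false := by
        intro v h1 h2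
        have := hw v h1 h2
        by_contra hc
        have : reachF L v = true := reachF_trans L (ch1 L) v (reachF_ch1 L hG.1)
          (by revert hc; cases reachF (ch1 L) v <;> simp)
        simp [hw v h1 h2] at this
      have hw2 : ∀ v, a ≤ v → v < b → reachF (ch2 L) v = false := by
        intro v h1 h2
        by_contra hc
        have : reachF L v = true := reachF_trans L (ch2 L) v (reachF_ch2 L hG.1)
          (by revert hc; cases reachF (ch2 L) v <;> simp)
        simp [hw v h1 h2] at this
      rw [pcGE_gap a b (ch1 L) k hab hw1, pcGE_gap a b (ch2 L) k hab hw2]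
    · have hG' : ¬ (1 ≤ L ∧ b ≤ L) := by omega
      rw [pcGE_unfold a L k, if_neg hkL, if_neg hG]
      rw [pcGE_unfold b L k, if_neg hkL, if_neg hG']
termination_by L.toNat
decreasing_by all_goals simp only [ch1, ch2, fd2]; omega

def mfold (l : List (Int × Int)) (res : PySem.Dict Int Int) : PySem.Dict Int Int :=
  l.foldl (fun d kv => d.insert kv.1 (d.getD kv.1 0 + kv.2)) res

theorem pvMerge_eq_mfold (res src : PySem.Dict Int Int) : pvMerge res src = mfold src.items res := rfl

def ocomb : Option Int → Option Int → Option Int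
  | some a, some b => some (a + b)
  | some a, none => some a
  | none, ob => ob

theorem mfold_get? (l : List (Int × Int)) (res : PySem.Dict Int Int) (k : Int)
    (hnd : (l.map Prod.fst).Nodup) :
    (mfold l res).get? k =
      match (l.find? (fun p => p.1 == k)).map Prod.snd with
      | some b => some (res.getD k 0 + b)
      | none => res.get? k := by
  induction l generalizing res with
  | nil => simp [mfold]
  | cons a t ih =>
    simp only [List.map_cons, List.nodup_cons] at hnd
    have step : mfold (a :: t) res = mfold t (res.insert a.1 (res.getD a.1 0 + a.2)) := rfl
    rw [step]
    by_cases hk : a.1 = k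
    · subst hk
      have hfind : (t.find? (fun p => p.1 == a.1)) = none := by
        rw [List.find?_eq_none]
        intro p hp
        simp only [beq_iff_eq]
        intro hc; exact hnd.1 (by rw [← hc]; exact List.mem_map_of_mem hp)
      rw [ih _ hnd.2]
      simp [List.find?, hfind, PySem.Dict.get?_insert_self]
    · rw [ih _ hnd.2]
      have hb : (a.1 == k) = false := by simp [hk]
      have hfind : (a :: t).find? (fun p => p.1 == k) = t.find? (fun p => p.1 == k) := by
        simp [List.find?, hb]
      have h1 : (res.insert a.1 (res.getD a.1 0 + a.2)).getD k 0 = res.getD k 0 := by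
        rw [PySem.Dict.getD_insert]; simp [show ¬ k = a.1 from fun h => hk h.symm]
      have h2 : (res.insert a.1 (res.getD a.1 0 + a.2)).get? k = res.get? k := by
        rw [PySem.Dict.get?_insert]; simp [show ¬ k = a.1 from fun h => hk h.symm]
      rw [hfind, h1, h2]

theorem pvMerge_get? (res src : PySem.Dict Int Int) (k : Int) (hnd : src.keys.Nodup) :
    (pvMerge res src).get? k = ocomb (res.get? k) (src.get? k) := by
  rw [pvMerge_eq_mfold, mfold_get? _ _ _ hnd]
  have hsrc : src.get? k = (src.items.find? (fun p => p.1 == k)).map Prod.snd := rfl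
  rw [← hsrc]
  cases hs : src.get? k with
  | none => cases hr : res.get? k <;> simp [ocomb]
  | some b =>
    cases hr : res.get? k with
    | none =>
      simp only [ocomb]
      rw [PySem.Dict.getD_eq_get?_getD, hr]; simp
    | some a =>
      simp only [ocomb]
      rw [PySem.Dict.getD_eq_get?_getD, hr]; simp

theorem mfold_keys_nodup (l : List (Int × Int)) (res : PySem.Dict Int Int)
    (h : res.keys.Nodup) : (mfold l res).keys.Nodup := by
  induction l generalizing res with
  | nil => exact h
  | cons a t ih => exact ih _ (PySem.Dict.nodup_keys_insert _ _ _ h)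

theorem pvMerge_keys_nodup (res src : PySem.Dict Int Int) (h : res.keys.Nodup) :
    (pvMerge res src).keys.Nodup := mfold_keys_nodup _ _ h

def Dpure (L : Int) : PySem.Dict Int Int :=
  if 1 ≤ L then
    pvMerge (pvMerge (PySem.Dict.empty.insert L 1) (Dpure (ch1 L))) (Dpure (ch2 L))
  else PySem.Dict.empty.insert L 1
termination_by L.toNat
decreasing_by all_goals simp only [ch1, ch2, fd2]; omega

theorem single_get? (L k : Int) :
    (PySem.Dict.empty.insert L (1:Int)).get? k = if k = L then some 1 else none := by
  rw [PySem.Dict.get?_insert]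
  split_ifs <;> simp [PySem.Dict.get?_empty]

theorem single_keys_nodup (L : Int) : (PySem.Dict.empty.insert L (1:Int)).keys.Nodup :=
  PySem.Dict.nodup_keys_insert _ _ _ (by simp [PySem.Dict.keys_empty])

theorem Dpure_keys_nodup (L : Int) : (Dpure L).keys.Nodup := by
  rw [Dpure]
  split_ifs
  · exact pvMerge_keys_nodup _ _ (pvMerge_keys_nodup _ _ (single_keys_nodup L))
  · exact single_keys_nodup L

theorem Dpure_get? (L k : Int) (h0 : 0 ≤ L) :
    (Dpure L).get? k = if reachF L k = true then some (pcF L k) else none := by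
  by_cases h1 : 1 ≤ L
  · have hc1 := ch1_lt L h1
    have hc2 := ch2_lt L h1
    rw [Dpure, if_pos h1]
    rw [pvMerge_get? _ _ _ (Dpure_keys_nodup (ch2 L)),
        pvMerge_get? _ _ _ (Dpure_keys_nodup (ch1 L)), single_get?]
    rw [Dpure_get? (ch1 L) k hc1.1, Dpure_get? (ch2 L) k hc2.1]
    rw [reachF_unfold L k h1, pcF_unfold L k h1]
    by_cases hk : k = L
    · subst hk
      have r1 : reachF (ch1 k) k = false := by
        by_contra hc
        have := reachF_le (ch1 k) k (by revert hc; cases reachF (ch1 k) k <;> simp)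
        omega
      have r2 : reachF (ch2 k) k = false := by
        by_contra hc
        have := reachF_le (ch2 k) k (by revert hc; cases reachF (ch2 k) k <;> simp)
        omega
      simp [r1, r2, ocomb]
    · rw [if_neg hk]
      cases hr1 : reachF (ch1 L) k <;> cases hr2 : reachF (ch2 L) k
      · simp [ocomb, hk]
      · simp [ocomb, hk, pcF_eq_zero _ _ hr1]
      · simp [ocomb, hk, pcF_eq_zero _ _ hr2]
      · simp [ocomb, hk]
  · rw [Dpure, if_neg h1, single_get?, reachF_base L k h1]
    by_cases hk : k = L
    · subst hk; rw [pcF]; simp [h1]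
    · simp [hk]
termination_by L.toNat
decreasing_by all_goals simp only [ch1, ch2, fd2]; omega

-- memoisation invariant
def MInv (memo : PySem.Dict Int (PySem.Dict Int Int)) : Prop :=
  ∀ k d, memo.get? k = some d → d = Dpure k

theorem MInv_insert (memo : PySem.Dict Int (PySem.Dict Int Int)) (k : Int)
    (d : PySem.Dict Int Int) (h : MInv memo) (hd : d = Dpure k) :
    MInv (memo.insert k d) := by
  intro k' d' h'
  rw [PySem.Dict.get?_insert] at h'
  split_ifs at h' with he
  · subst he; cases h'; exact hd
  · exact h k' d' h'

theorem pvContrib_correct : ∀ (fuel : Nat) (memo : PySem.Dict Int (PySem.Dict Int Int)) (L : Int),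
    0 ≤ L → L.toNat < fuel → MInv memo →
    (pvContrib fuel memo L).1 = Dpure L ∧ MInv (pvContrib fuel memo L).2 := by
  intro fuel
  induction fuel with
  | zero => intro memo L h0 hf hm; omega
  | succ f ih =>
    intro memo L h0 hf hm
    rw [pvContrib]
    cases hg : memo.get? L with
    | some r => exact ⟨hm L r hg, hm⟩
    | none =>
      simp only
      by_cases hL : L = 0
      · subst hL
        simp only [if_pos rfl]
        refine ⟨by rw [Dpure, if_neg (by omega : ¬ (1:Int) ≤ 0)]; rfl,
          MInv_insert _ _ _ hm (by rw [Dpure, if_neg (by omega : ¬ (1:Int) ≤ 0)]; rfl)⟩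
      · have h1 : 1 ≤ L := by omega
        have hc1 := ch1_lt L h1
        have hc2 := ch2_lt L h1
        have hb1 : (PySem.Int.floordiv (L - 1) 2).toNat < f := by
          have : (ch1 L).toNat < L.toNat := by simp only [ch1, fd2]; omega
          simpa [ch1] using (by omega : (ch1 L).toNat < f)
        have hb2 : (PySem.Int.floordiv L 2).toNat < f := by
          have : (ch2 L).toNat < L.toNat := by simp only [ch2, fd2]; omega
          simpa [ch2] using (by omega : (ch2 L).toNat < f)
        have ih1 := ih memo (PySem.Int.floordiv (L - 1) 2) (by simpa [ch1] using hc1.1) hb1 hm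
        have ih2 := ih (pvContrib f memo (PySem.Int.floordiv (L - 1) 2)).2
          (PySem.Int.floordiv L 2) (by simpa [ch2] using hc2.1) hb2 ih1.2
        simp only [if_neg hL]
        constructor
        · show pvMerge (pvMerge (PySem.Dict.ofList [(L, 1)])
            (pvContrib f memo (PySem.Int.floordiv (L - 1) 2)).1)
            (pvContrib f (pvContrib f memo (PySem.Int.floordiv (L - 1) 2)).2
              (PySem.Int.floordiv L 2)).1 = Dpure L
          rw [ih1.1, ih2.1]
          conv_rhs => rw [Dpure, if_pos h1]
          rfl
        · exact MInv_insert _ _ _ ih2.2 (by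
            show pvMerge (pvMerge (PySem.Dict.ofList [(L, 1)])
              (pvContrib f memo (PySem.Int.floordiv (L - 1) 2)).1)
              (pvContrib f (pvContrib f memo (PySem.Int.floordiv (L - 1) 2)).2
                (PySem.Int.floordiv L 2)).1 = Dpure L
            rw [ih1.1, ih2.1]
            conv_rhs => rw [Dpure, if_pos h1]
            rfl)

theorem setdefault_eq (d : PySem.Dict Int Int) (a v : Int) :
    d.setdefault a v = if d.contains a then d else d.insert a v := by
  by_cases hc : d.contains a
  · simp [PySem.Dict.setdefault, hc]
  · simp only [Bool.not_eq_true] at hc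
    simp only [PySem.Dict.setdefault, hc, if_neg, Bool.false_eq_true]
    show PySem.Dict.mk (d.items ++ [(a, v)]) = d.insert a v
    rw [← PySem.Dict.items_insert_of_not_contains (h := hc)]

theorem setdefault_get? (d : PySem.Dict Int Int) (a v k : Int) :
    (d.setdefault a v).get? k =
      if k = a ∧ d.contains a = false then some v else d.get? k := by
  rw [setdefault_eq]
  by_cases hc : d.contains a
  · simp [hc]
  · simp only [Bool.not_eq_true] at hc
    simp only [hc, Bool.false_eq_true, if_false, PySem.Dict.get?_insert]
    split_ifs with h1 h2 h3 <;> tauto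

theorem setdefault_keys_nodup (d : PySem.Dict Int Int) (a v : Int) (h : d.keys.Nodup) :
    (d.setdefault a v).keys.Nodup := by
  rw [setdefault_eq]
  split_ifs
  · exact h
  · exact PySem.Dict.nodup_keys_insert _ _ _ h

-- B's final dictionary
def dF (N : Int) : PySem.Dict Int Int :=
  (((Dpure N).setdefault 1 0).setdefault 0 0)

theorem dF_keys_nodup (N : Int) : (dF N).keys.Nodup :=
  setdefault_keys_nodup _ _ _ (setdefault_keys_nodup _ _ _ (Dpure_keys_nodup N))

theorem dF_get? (N k : Int) (h0 : 0 ≤ N) :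
    (dF N).get? k =
      if reachF N k = true then some (pcF N k)
      else if k = 1 ∨ k = 0 then some 0 else none := by
  unfold dF
  rw [setdefault_get?, setdefault_get?, Dpure_get? N k h0]
  have hC1 : (Dpure N).contains 1 = reachF N 1 := by
    rw [PySem.Dict.contains_eq_isSome_get?, Dpure_get? N 1 h0]
    cases reachF N 1 <;> simp
  have hC0 : ((Dpure N).setdefault 1 0).contains 0 = reachF N 0 := by
    rw [PySem.Dict.contains_eq_isSome_get?, setdefault_get?, Dpure_get? N 0 h0, hC1]
    rw [if_neg (by simp)]
    cases reachF N 0 <;> simp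
  rw [hC0, hC1]
  by_cases hz : k = 0
  · subst hz
    cases h0r : reachF N 0 <;> simp [h0r]
  · by_cases h1 : k = 1
    · subst h1
      cases h1r : reachF N 1 <;> simp [h1r]
    · simp [hz, h1]

theorem dF_mem_keys (N k : Int) (h0 : 0 ≤ N) :
    k ∈ (dF N).keys ↔ (reachF N k = true ∨ k = 1 ∨ k = 0) := by
  rw [← PySem.Dict.contains_iff_mem_keys, PySem.Dict.contains_eq_isSome_get?, dF_get? N k h0]
  split_ifs with h1 h2 <;> simp [h1] <;> tauto

theorem dF_getD (N k : Int) (h0 : 0 ≤ N) (hk : k ∈ (dF N).keys) :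
    (dF N).getD k 0 = pcF N k := by
  rw [PySem.Dict.getD_eq_get?_getD, dF_get? N k h0]
  rcases (dF_mem_keys N k h0).1 hk with h | h
  · simp [h]
  · by_cases hr : reachF N k = true
    · simp [hr]
    · simp only [Bool.not_eq_true] at hr
      rw [pcF_eq_zero N k hr]
      simp [hr, h]

theorem alt_eq (N : Int) (h0 : 0 ≤ N) :
    interval_frequencies_alt N =
      (PySem.List.sorted (dF N).keys (fun x => x) false).map (fun k => (k, pcF N k)) := by
  unfold interval_frequencies_alt
  have hc := pvContrib_correct (N.toNat + 1) PySem.Dict.empty N h0 (by omega)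
    (by intro k d h; rw [PySem.Dict.get?_empty] at h; cases h)
  rw [hc.1]
  show (PySem.List.sorted (dF N).keys (fun x => x) false).map (fun k => (k, (dF N).getD k 0)) = _
  apply List.map_congr_left
  intro k hk
  rw [dF_getD N k h0 ((PySem.List.mem_sorted _ _ _ _).1 hk)]

theorem slice_tail_reverse (xs : List Int) :
    PySem.List.slice? xs none (some 0) (-1) = some ((xs.drop 1).reverse) := by
  rcases List.eq_nil_or_concat xs with h | ⟨_, _, h⟩
  · subst h; rfl
  · have hne : xs ≠ [] := by subst h; simp
    simp only [PySem.List.slice?, PySem.List.sliceIndices]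
    norm_num
    have hlen : 1 ≤ xs.length := List.length_pos_iff.2 hne
    have hcount : (if 1 < xs.length then
        ((xs.length:Int) - 1 - min 0 ((xs.length:Int) - 1)).toNat else 0) = xs.length - 1 := by
      split_ifs with hl
      · have : (min 0 ((xs.length:Int) - 1)) = 0 := by omega
        omega
      · omega
    rw [hcount]
    have hfun : ∀ k ∈ List.range (xs.length - 1),
        xs[((xs.length:Int) - 1 + -(k:Int)).toNat]? = some (xs.reverse[k]!) := by
      intro k hk
      rw [List.mem_range] at hk
      have hidx : ((xs.length:Int) - 1 + -(k:Int)).toNat = xs.length - 1 - k := by omega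
      have hkb : k < xs.reverse.length := by simp; omega
      rw [hidx, List.getElem?_eq_getElem (by omega), List.getElem!_eq_getElem?_getD,
          List.getElem?_eq_getElem hkb]
      simp [List.getElem_reverse]
    rw [List.filterMap_congr hfun]
    rw [show (fun k => some (xs.reverse[k]!)) = (some ∘ fun k => xs.reverse[k]!) from rfl,
      List.filterMap_eq_map]
    rw [← List.dropLast_reverse, List.dropLast_eq_take]
    apply List.ext_getElem
    · simp
    · intro i hi1 hi2
      simp only [List.getElem_map, List.getElem_range, List.getElem_take]
      rw [List.getElem!_eq_getElem?_getD, List.getElem?_eq_getElem (by simp at hi2 ⊢; omega)]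
      rfl

-- invariant carried through relevant_cases' loops
def LInv (N n : Int) (s : PySem.Set Int) : Prop :=
  reachF N n = true ∧ n ∈ s ∧ (∀ x ∈ s, reachF N x = true ∧ 0 ≤ x) ∧
  (∀ v, reachF N v = true → v ∈ s ∨ reachF n v = true) ∧ s.Nodup

theorem reachF_child_trans (N n v : Int) (h1 : 1 ≤ n) (hn : reachF N n = true)
    (hc : reachF (ch1 n) v = true ∨ reachF (ch2 n) v = true) : reachF N v = true := by
  rcases hc with hc | hc
  · exact reachF_trans N n v hn (reachF_trans n (ch1 n) v (reachF_ch1 n h1) hc)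
  · exact reachF_trans N n v hn (reachF_trans n (ch2 n) v (reachF_ch2 n h1) hc)

theorem pvLoop1_spec : ∀ (fuel : Nat) (N n : Int) (s : PySem.Set Int),
    0 ≤ n → n.toNat < fuel → LInv N n s →
    2 ∣ (pvLoop1 fuel n s).1 ∧ 0 ≤ (pvLoop1 fuel n s).1 ∧
      LInv N (pvLoop1 fuel n s).1 (pvLoop1 fuel n s).2 := by
  intro fuel
  induction fuel with
  | zero => intro N n s h0 hf; omega
  | succ f ih =>
    intro N n s h0 hf hI
    rw [pvLoop1]
    by_cases hc : PySem.Int.mod (n - 1) 2 = 0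
    · rw [if_pos hc]
      rw [PySem.Int.mod_eq_zero_iff_dvd] at hc
      have hodd : n % 2 = 1 := by omega
      have h1 : 1 ≤ n := by omega
      have hch : PySem.Int.floordiv (n - 1) 2 = ch1 n := rfl
      have hb : 0 ≤ ch1 n ∧ ch1 n < n := ch1_lt n h1
      have hsame : ch2 n = ch1 n := by
        simp only [ch1, ch2, fd2]; omega
      rw [hch]
      obtain ⟨hr, hns, hall, hcov, hnd⟩ := hI
      apply ih
      · omega
      · omega
      · refine ⟨reachF_child_trans N n _ h1 hr (Or.inl (reachF_self _)), ?_, ?_, ?_, ?_⟩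
        · rw [PySem.Set.mem_add]; right; rfl
        · intro x hx
          rw [PySem.Set.mem_add] at hx
          rcases hx with hx | hx
          · exact hall x hx
          · subst hx
            exact ⟨reachF_child_trans N n _ h1 hr (Or.inl (reachF_self _)), by omega⟩
        · intro v hv
          rcases hcov v hv with hv' | hv'
          · left; rw [PySem.Set.mem_add]; left; exact hv'
          · rw [reachF_unfold n v h1] at hv'
            simp only [Bool.or_eq_true, decide_eq_true_eq] at hv'
            rcases hv' with (he | he) | he
            · left; rw [PySem.Set.mem_add]; left; rw [he]; exact hns
            · right; exact he
            · right; rw [← hsame]; exact he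
        · exact PySem.Set.nodup_add _ _ hnd
    · rw [if_neg hc]
      rw [PySem.Int.mod_eq_zero_iff_dvd] at hc
      refine ⟨by omega, h0, hI⟩

theorem pvLoop2_spec : ∀ (fuel : Nat) (N n : Int) (s : PySem.Set Int),
    0 ≤ n → 2 ∣ n → n.toNat < fuel → LInv N n s →
    ∃ m, 0 ≤ m ∧ m < 3 ∧ 2 ∣ m ∧ LInv N m (pvLoop2 fuel n s) := by
  intro fuel
  induction fuel with
  | zero => intro N n s h0 he hf; omega
  | succ f ih =>
    intro N n s h0 he hf hI
    rw [pvLoop2]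
    by_cases hc : 3 ≤ n
    · rw [if_pos hc]
      have h4 : 4 ≤ n := by omega
      have hch1 : pvFloorHalf n = ch1 n := rfl
      have hch2 : pvCeilHalf n = ch2 n := pvCeilHalf_eq n
      have hv1 : ch1 n = n / 2 - 1 := by simp only [ch1, fd2]; omega
      have hv2 : ch2 n = n / 2 := by simp only [ch2, fd2]
      obtain ⟨hr, hns, hall, hcov, hnd⟩ := hI
      set s' := PySem.Set.add (PySem.Set.add s (pvFloorHalf n)) (pvCeilHalf n) with hs'
      have hmem1 : ch1 n ∈ s' := by
        rw [hs', hch1, hch2, PySem.Set.mem_add, PySem.Set.mem_add]; tauto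
      have hmem2 : ch2 n ∈ s' := by
        rw [hs', hch1, hch2, PySem.Set.mem_add]; tauto
      have hsub : ∀ x ∈ s, x ∈ s' := by
        intro x hx; rw [hs', hch1, hch2, PySem.Set.mem_add, PySem.Set.mem_add]; tauto
      have hn1 : 1 ≤ n := by omega
      have hrc1 : reachF N (ch1 n) = true :=
        reachF_child_trans N n _ hn1 hr (Or.inl (reachF_self _))
      have hrc2 : reachF N (ch2 n) = true :=
        reachF_child_trans N n _ hn1 hr (Or.inr (reachF_self _))
      have hall' : ∀ x ∈ s', reachF N x = true ∧ 0 ≤ x := by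
        intro x hx
        rw [hs', hch1, hch2, PySem.Set.mem_add, PySem.Set.mem_add] at hx
        rcases hx with (hx | hx) | hx
        · exact hall x hx
        · subst hx; exact ⟨hrc1, by omega⟩
        · subst hx; exact ⟨hrc2, by omega⟩
      have hnd' : s'.Nodup := PySem.Set.nodup_add _ _ (PySem.Set.nodup_add _ _ hnd)
      -- the chosen next value is the even one of the two children
      set n' := if PySem.Int.mod (pvFloorHalf n) 2 = 0 then pvFloorHalf n else pvCeilHalf n with hn'
      have hn'2 : n' = ch1 n ∨ n' = ch2 n := by
        rw [hn', hch1, hch2]; split_ifs <;> tauto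
      have hn'even : 2 ∣ n' := by
        rw [hn']
        by_cases hpar : PySem.Int.mod (pvFloorHalf n) 2 = 0
        · rw [if_pos hpar]
          rw [hch1] at hpar ⊢
          rw [PySem.Int.mod_eq_zero_iff_dvd] at hpar; exact hpar
        · rw [if_neg hpar]
          rw [hch1] at hpar
          rw [PySem.Int.mod_eq_zero_iff_dvd] at hpar
          rw [hch2, hv2]
          rw [hv1] at hpar
          omega
      have hn'low : 1 ≤ n' ∧ n' < n := by
        rcases hn'2 with h | h <;> rw [h] <;> omega
      have hrn' : reachF N n' = true := by
        rcases hn'2 with h | h <;> rw [h] <;> assumption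
      have hmemn' : n' ∈ s' := by
        rcases hn'2 with h | h <;> rw [h] <;> assumption
      -- coverage
      have hcov' : ∀ v, reachF N v = true → v ∈ s' ∨ reachF n' v = true := by
        intro v hv
        rcases hcov v hv with hv' | hv'
        · exact Or.inl (hsub v hv')
        · rw [reachF_unfold n v hn1] at hv'
          simp only [Bool.or_eq_true, decide_eq_true_eq] at hv'
          rcases hv' with (he | he) | he
          · exact Or.inl (hsub v (he ▸ hns))
          · -- v reachable from ch1 n
            rcases hn'2 with hh | hh
            · right; rw [hh]; exact he
            · -- n' = ch2 n, the odd sibling is ch1 n = n' - 1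
              by_cases hveq : v = ch1 n
              · left; rw [hveq]; exact hmem1
              · -- unfold reach from the odd sibling
                have hodd1 : 1 ≤ ch1 n := by omega
                rw [reachF_unfold (ch1 n) v hodd1] at he
                simp only [Bool.or_eq_true, decide_eq_true_eq] at he
                have hsib : ch1 (ch1 n) = ch1 n' ∧ ch2 (ch1 n) = ch1 n' := by
                  refine ⟨?_, ?_⟩ <;> (simp only [ch1, ch2, fd2] at *; omega)
                rcases he with (he | he) | he
                · exact absurd he hveq
                · right
                  rw [hsib.1] at he
                  exact reachF_trans n' (ch1 n') v (reachF_ch1 n' (by omega)) he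
                · right
                  rw [hsib.2] at he
                  exact reachF_trans n' (ch1 n') v (reachF_ch1 n' (by omega)) he
          · -- v reachable from ch2 n
            rcases hn'2 with hh | hh
            · -- n' = ch1 n, the odd sibling is ch2 n = n' + 1
              by_cases hveq : v = ch2 n
              · left; rw [hveq]; exact hmem2
              · have hodd2 : 1 ≤ ch2 n := by omega
                rw [reachF_unfold (ch2 n) v hodd2] at he
                simp only [Bool.or_eq_true, decide_eq_true_eq] at he
                have hsib : ch1 (ch2 n) = ch2 n' ∧ ch2 (ch2 n) = ch2 n' := by
                  refine ⟨?_, ?_⟩ <;> (simp only [ch1, ch2, fd2] at *; omega)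
                rcases he with (he | he) | he
                · exact absurd he hveq
                · right
                  rw [hsib.1] at he
                  exact reachF_trans n' (ch2 n') v (reachF_ch2 n' (by omega)) he
                · right
                  rw [hsib.2] at he
                  exact reachF_trans n' (ch2 n') v (reachF_ch2 n' (by omega)) he
            · right; rw [hh]; exact he
      exact ih N n' s' (by omega) hn'even (by omega) ⟨hrn', hmemn', hall', hcov', hnd'⟩
    · rw [if_neg hc]
      exact ⟨n, h0, by omega, he, hI⟩

theorem ch1_two : ch1 2 = 0 := by simp only [ch1, fd2]; decide
theorem ch2_two : ch2 2 = 1 := by simp only [ch2, fd2]; decide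
theorem ch1_one : ch1 1 = 0 := by simp only [ch1, fd2]; decide
theorem ch2_one : ch2 1 = 0 := by simp only [ch2, fd2]; decide

theorem reachF_zero_elim (v : Int) (h : reachF 0 v = true) : v = 0 := by
  rw [reachF_base 0 v (by omega)] at h
  simpa using h

theorem reachF_one_elim (v : Int) (h : reachF 1 v = true) : v = 1 ∨ v = 0 := by
  rw [reachF_unfold 1 v (by omega), ch1_one, ch2_one] at h
  simp only [Bool.or_eq_true, decide_eq_true_eq] at h
  rcases h with (h | h) | h
  · exact Or.inl h
  · exact Or.inr (reachF_zero_elim v h)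
  · exact Or.inr (reachF_zero_elim v h)

theorem reachF_two_elim (v : Int) (h : reachF 2 v = true) : v = 2 ∨ v = 1 ∨ v = 0 := by
  rw [reachF_unfold 2 v (by omega), ch1_two, ch2_two] at h
  simp only [Bool.or_eq_true, decide_eq_true_eq] at h
  rcases h with (h | h) | h
  · exact Or.inl h
  · exact Or.inr (Or.inr (reachF_zero_elim v h))
  · exact Or.inr (reachF_one_elim v h)

theorem relevantCases_spec (N : Int) (h0 : 0 ≤ N) :
    ∃ F : PySem.Set Int, relevantCases N = PySem.List.sorted F (fun x => x) false ∧
      F.Nodup ∧ (∀ k, k ∈ F ↔ (reachF N k = true ∨ k = 1 ∨ k = 0)) ∧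
      (∀ k ∈ F, 0 ≤ k) := by
  unfold relevantCases
  have hInit : LInv N N (PySem.Set.ofList [N]) := by
    refine ⟨reachF_self N, ?_, ?_, ?_, PySem.Set.nodup_ofList _⟩
    · rw [PySem.Set.mem_ofList]; simp
    · intro x hx
      rw [PySem.Set.mem_ofList] at hx
      simp at hx
      subst hx; exact ⟨reachF_self _, h0⟩
    · intro v hv; exact Or.inr hv
  have h1 := pvLoop1_spec (N.toNat + 2) N N (PySem.Set.ofList [N]) h0 (by omega) hInit
  obtain ⟨hdvd, hge, hI1⟩ := h1
  have hne1 : ¬ ((pvLoop1 (N.toNat + 2) N (PySem.Set.ofList [N])).1 = 1) := by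
    intro h; rw [h] at hdvd; omega
  rw [if_neg hne1]
  have hle : (pvLoop1 (N.toNat + 2) N (PySem.Set.ofList [N])).1 ≤ N :=
    (reachF_le N _ hI1.1).1
  obtain ⟨m, hm0, hm3, hmdvd, hI2⟩ :=
    pvLoop2_spec (N.toNat + 2) N _ _ hge hdvd (by omega) hI1
  obtain ⟨hrm, hms, hall, hcov, hnd⟩ := hI2
  refine ⟨_, rfl, ?_, ?_, ?_⟩
  · exact PySem.Set.nodup_add _ _ (PySem.Set.nodup_add _ _ hnd)
  · intro k
    rw [PySem.Set.mem_add, PySem.Set.mem_add]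
    constructor
    · rintro ((hk | hk) | hk)
      · exact Or.inl (hall k hk).1
      · exact Or.inr (Or.inl hk)
      · exact Or.inr (Or.inr hk)
    · rintro (hk | hk | hk)
      · rcases hcov k hk with hk' | hk'
        · exact Or.inl (Or.inl hk')
        · have hm02 : m = 0 ∨ m = 2 := by omega
          rcases hm02 with hm | hm
          · rw [hm] at hk'
            exact Or.inr (reachF_zero_elim k hk')
          · rw [hm] at hk'
            rcases reachF_two_elim k hk' with h | h | h
            · exact Or.inl (Or.inl (by rw [h, ← hm]; exact hms))
            · exact Or.inl (Or.inr h)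
            · exact Or.inr h
      · exact Or.inl (Or.inr hk)
      · exact Or.inr hk
  · intro k hk
    rw [PySem.Set.mem_add, PySem.Set.mem_add] at hk
    rcases hk with (hk | hk) | hk
    · exact (hall k hk).2
    · omega
    · omega

-- the body of A's propagation loop
def dpStep (od : Option (PySem.Dict Int Int)) (L : Int) : Option (PySem.Dict Int Int) :=
  od.bind (fun d =>
    match d.get? (pvFloorHalf L), d.get? L with
    | some a, some b =>
      let d' := d.insert (pvFloorHalf L) (a + b)
      match d'.get? (pvCeilHalf L), d'.get? L with
      | some a2, some b2 => some (d'.insert (pvCeilHalf L) (a2 + b2))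
      | _, _ => none
    | _, _ => none)

theorem build0_spec : ∀ (l : List Int) (d : PySem.Dict Int Int),
    l.Nodup → (∀ x ∈ l, x ∉ d.keys) →
    (l.foldl (fun d k => d.insert k 0) d).keys = d.keys ++ l ∧
    (∀ k, (l.foldl (fun d k => d.insert k 0) d).get? k =
      if k ∈ l then some 0 else d.get? k) := by
  intro l
  induction l with
  | nil => intro d _ _; simp
  | cons a t ih =>
    intro d hnd hdisj
    simp only [List.nodup_cons] at hnd
    have hca : d.contains a = false := by
      rw [← Bool.not_eq_true, PySem.Dict.contains_iff_mem_keys]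
      exact hdisj a (by simp)
    have hkeys : (d.insert a 0).keys = d.keys ++ [a] :=
      PySem.Dict.keys_insert_of_not_contains d 0 hca
    have hdisj' : ∀ x ∈ t, x ∉ (d.insert a 0).keys := by
      intro x hx
      rw [hkeys]
      simp only [List.mem_append, List.mem_singleton]
      rintro (h | h)
      · exact hdisj x (by simp [hx]) h
      · exact hnd.1 (h ▸ hx)
    obtain ⟨ihk, ihg⟩ := ih (d.insert a 0) hnd.2 hdisj'
    constructor
    · show (t.foldl (fun d k => d.insert k 0) (d.insert a 0)).keys = d.keys ++ a :: t
      rw [ihk, hkeys]; simp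
    · intro k
      show (t.foldl (fun d k => d.insert k 0) (d.insert a 0)).get? k = _
      rw [ihg k]
      by_cases hkt : k ∈ t
      · simp [hkt]
      · by_cases hka : k = a
        · subst hka
          simp [hkt, PySem.Dict.get?_insert_self]
        · rw [PySem.Dict.get?_insert]
          simp [hkt, hka]

theorem dp_fold (N : Int) (lens : List Int)
    (hcl : ∀ j ∈ lens, 1 ≤ j → ch1 j ∈ lens ∧ ch2 j ∈ lens)
    (hreach : ∀ v, reachF N v = true → v ∈ lens) :
    ∀ (ds : List Int) (t : Int) (d : PySem.Dict Int Int),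
    1 ≤ t →
    d.keys = lens →
    (∀ k, d.get? k = if k ∈ lens then some (pcGE t N k) else none) →
    ds.Pairwise (· > ·) →
    (∀ j ∈ ds, 1 ≤ j ∧ j ∈ lens) →
    (∀ j ∈ ds, j < t) →
    (∀ x ∈ lens, x < t → x ∈ ds ∨ x = 0) →
    ∃ d', ds.foldl dpStep (some d) = some d' ∧ d'.keys = lens ∧
      ∃ t', 1 ≤ t' ∧
        (∀ k, d'.get? k = if k ∈ lens then some (pcGE t' N k) else none) ∧
        (∀ x ∈ lens, x < t' → x = 0) := by
  intro ds
  induction ds with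
  | nil =>
    intro t d ht hkeys hval _ _ _ hbelow
    exact ⟨d, rfl, hkeys, t, ht, hval, fun x hx hxt => by
      rcases hbelow x hx hxt with h | h
      · cases h
      · exact h⟩
  | cons j rest ih =>
    intro t d ht hkeys hval hpw hmem hlt hbelow
    have hj1 : 1 ≤ j := (hmem j (by simp)).1
    have hjmem : j ∈ lens := (hmem j (by simp)).2
    have hjt : j < t := hlt j (by simp)
    obtain ⟨hc1m, hc2m⟩ := hcl j hjmem hj1
    have hc1b := ch1_lt j hj1
    have hc2b := ch2_lt j hj1
    rw [List.pairwise_cons] at hpw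
    -- move the threshold down to j + 1 across the reachable-free gap
    have hval' : ∀ k, d.get? k = if k ∈ lens then some (pcGE (j+1) N k) else none := by
      intro k
      rw [hval k]
      by_cases hk : k ∈ lens
      · rw [if_pos hk, if_pos hk, pcGE_gap (j+1) t N k (by omega) ?_]
        intro v hv1 hv2
        by_contra hcv
        simp only [Bool.not_eq_false] at hcv
        have hvl := hreach v hcv
        rcases hbelow v hvl (by omega) with h | h
        · rcases List.mem_cons.1 h with h | h
          · omega
          · have := hpw.1 v h; omega
        · omega
      · simp [hk]
    set A := pcGE (j+1) N (ch1 j) with hA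
    set B := pcGE (j+1) N j with hB
    have hg1 : d.get? (ch1 j) = some A := by rw [hval' _, if_pos hc1m]
    have hgj : d.get? j = some B := by rw [hval' _, if_pos hjmem]
    set A2 : Int := if ch2 j = ch1 j then A + B else pcGE (j+1) N (ch2 j) with hA2
    set d2 := (d.insert (ch1 j) (A + B)).insert (ch2 j) (A2 + B) with hd2
    have hstep : dpStep (some d) j = some d2 := by
      show ((match d.get? (pvFloorHalf j), d.get? j with
        | some a, some b =>
          let d' := d.insert (pvFloorHalf j) (a + b)
          match d'.get? (pvCeilHalf j), d'.get? j with
          | some a2, some b2 => some (d'.insert (pvCeilHalf j) (a2 + b2))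
          | _, _ => none
        | _, _ => none) : Option (PySem.Dict Int Int)) = some d2
      rw [show pvFloorHalf j = ch1 j from rfl, pvCeilHalf_eq j, hg1, hgj]
      simp only
      have hga2 : (d.insert (ch1 j) (A + B)).get? (ch2 j) = some A2 := by
        rw [PySem.Dict.get?_insert, hA2]
        by_cases he : ch2 j = ch1 j
        · simp [he]
        · rw [if_neg he, if_neg he, hval' _, if_pos hc2m]
      have hgj2 : (d.insert (ch1 j) (A + B)).get? j = some B := by
        rw [PySem.Dict.get?_insert, if_neg (by omega), hgj]
      rw [hga2, hgj2]
    have hkeys2 : d2.keys = lens := by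
      rw [hd2, PySem.Dict.keys_insert_of_contains, PySem.Dict.keys_insert_of_contains, hkeys]
      · exact (PySem.Dict.contains_iff_mem_keys _ _).2 (hkeys ▸ hc1m)
      · rw [PySem.Dict.contains_insert]
        by_cases he : ch2 j = ch1 j
        · simp [he]
        · rw [(PySem.Dict.contains_iff_mem_keys _ _).2 (hkeys ▸ hc2m)]
          simp
    have hval2 : ∀ k, d2.get? k = if k ∈ lens then some (pcGE j N k) else none := by
      intro k
      have hpeel := pcGE_peel j N k hj1
      rw [hd2, PySem.Dict.get?_insert, PySem.Dict.get?_insert]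
      by_cases hk2 : k = ch2 j
      · rw [if_pos hk2, if_pos (hk2 ▸ hc2m), hpeel]
        subst hk2
        unfold edg
        by_cases he : ch2 j = ch1 j
        · rw [hA2, if_pos he, if_pos (by omega), if_pos rfl, hA, he, hB]; exact congrArg some (by ring)
        · rw [hA2, if_neg he, if_neg (by omega), if_pos rfl, hB]; exact congrArg some (by ring)
      · rw [if_neg hk2]
        by_cases hk1 : k = ch1 j
        · rw [if_pos hk1, if_pos (hk1 ▸ hc1m), hpeel]
          subst hk1
          unfold edg
          rw [if_pos rfl, if_neg (by omega), hA, hB]; exact congrArg some (by ring)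
        · rw [if_neg hk1, hval' k]
          by_cases hk : k ∈ lens
          · rw [if_pos hk, if_pos hk, hpeel]
            unfold edg
            rw [if_neg (by omega), if_neg (by omega)]; exact congrArg some (by ring)
          · simp [hk]
    have happ : (j :: rest).foldl dpStep (some d) = rest.foldl dpStep (some d2) := by
      rw [List.foldl_cons, hstep]
    rw [happ]
    exact ih j d2 hj1 hkeys2 hval2 hpw.2
      (fun x hx => hmem x (by simp [hx]))
      (fun x hx => hpw.1 x hx)
      (fun x hx hxj => by
        rcases hbelow x hx (by omega) with h | h
        · rcases List.mem_cons.1 h with h | h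
          · omega
          · exact Or.inl h
        · exact Or.inr h)

theorem items_eq_keys_map (d : PySem.Dict Int Int) (hnd : d.keys.Nodup) :
    d.items = d.keys.map (fun k => (k, d.getD k 0)) := by
  have hk : d.keys = d.items.map Prod.fst := rfl
  rw [hk, List.map_map]
  conv_lhs => rw [← List.map_id d.items]
  apply List.map_congr_left
  intro p hp
  obtain ⟨k, v⟩ := p
  have hg : d.get? k = some v := PySem.Dict.get?_of_mem_items d hp hnd
  have : d.getD k 0 = v := by
    rw [PySem.Dict.getD_eq_get?_getD, hg]; rfl
  simp [this]

theorem head_zero (l : List Int) (h0m : (0:Int) ∈ l) (hpos : ∀ k ∈ l, 0 ≤ k)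
    (hplt : l.Pairwise (· < ·)) : ∃ tl, l = 0 :: tl := by
  cases l with
  | nil => cases h0m
  | cons h t =>
    have hh0 : 0 ≤ h := hpos h (by simp)
    rcases List.mem_cons.1 h0m with he | he
    · exact ⟨t, by rw [← he]⟩
    · have := (List.pairwise_cons.1 hplt).1 0 he
      omega

theorem a_core (N : Int) (h0 : 0 ≤ N) (lens : List Int)
    (hlnd : lens.Nodup)
    (hlmem : ∀ k, k ∈ lens ↔ (reachF N k = true ∨ k = 1 ∨ k = 0))
    (hlpos : ∀ k ∈ lens, 0 ≤ k)
    (hplt : lens.Pairwise (· < ·)) :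
    (match PySem.List.slice? lens none (some 0) (-1) with
     | none => ([] : List (Int × Int))
     | some rev =>
       match rev.foldl dpStep
           (some ((lens.foldl (fun d k => d.insert k 0) PySem.Dict.empty).insert N 1)) with
       | some d => d.items
       | none => []) = lens.map (fun k => (k, pcF N k)) := by
  have h0mem : (0:Int) ∈ lens := (hlmem 0).2 (Or.inr (Or.inr rfl))
  have h1mem : (1:Int) ∈ lens := (hlmem 1).2 (Or.inr (Or.inl rfl))
  have hNmem : N ∈ lens := (hlmem N).2 (Or.inl (reachF_self N))
  obtain ⟨tl, htl⟩ := head_zero lens h0mem hlpos hplt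
  have hcl : ∀ j ∈ lens, 1 ≤ j → ch1 j ∈ lens ∧ ch2 j ∈ lens := by
    intro j hj hj1
    rcases (hlmem j).1 hj with hr | h1 | h1
    · exact ⟨(hlmem _).2 (Or.inl (reachF_child_trans N j _ hj1 hr (Or.inl (reachF_self _)))),
        (hlmem _).2 (Or.inl (reachF_child_trans N j _ hj1 hr (Or.inr (reachF_self _))))⟩
    · subst h1
      rw [ch1_one, ch2_one]
      exact ⟨h0mem, h0mem⟩
    · omega
  have hreach : ∀ v, reachF N v = true → v ∈ lens := fun v hv => (hlmem v).2 (Or.inl hv)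
  have hbound : ∀ j ∈ lens, j ≤ max N 1 := by
    intro j hj
    rcases (hlmem j).1 hj with hr | h1 | h1
    · have := (reachF_le N j hr).1; omega
    · omega
    · omega
  set t0 : Int := max N 1 + 1 with ht0
  have hb := build0_spec lens PySem.Dict.empty hlnd (by intro x _; simp [PySem.Dict.keys_empty])
  set d0 : PySem.Dict Int Int := lens.foldl (fun d k => d.insert k 0) PySem.Dict.empty with hd0
  have hd0k : d0.keys = lens := by rw [hb.1, PySem.Dict.keys_empty]; rfl
  set d1 : PySem.Dict Int Int := d0.insert N 1 with hd1
  have hd1k : d1.keys = lens := by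
    rw [hd1, PySem.Dict.keys_insert_of_contains, hd0k]
    exact (PySem.Dict.contains_iff_mem_keys _ _).2 (hd0k ▸ hNmem)
  have hd1g : ∀ k, d1.get? k = if k ∈ lens then some (pcGE t0 N k) else none := by
    intro k
    rw [hd1, PySem.Dict.get?_insert, hb.2 k]
    have hpc : pcGE t0 N k = if k = N then 1 else 0 := pcGE_of_lt t0 N k (by omega)
    by_cases hk : k = N
    · subst hk
      rw [if_pos rfl, if_pos hNmem, hpc, if_pos rfl]
    · rw [if_neg hk, hpc, if_neg hk]
      by_cases hkl : k ∈ lens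
      · simp [hkl]
      · simp [hkl, PySem.Dict.get?_empty]
  have hds := dp_fold N lens hcl hreach tl.reverse t0 d1 (by omega) hd1k hd1g
    (by
      rw [List.pairwise_reverse]
      exact (List.pairwise_cons.1 (htl ▸ hplt)).2)
    (by
      intro j hj
      rw [List.mem_reverse] at hj
      have hjl : j ∈ lens := by rw [htl]; simp [hj]
      have := (List.pairwise_cons.1 (htl ▸ hplt)).1 j hj
      exact ⟨by omega, hjl⟩)
    (by
      intro j hj
      rw [List.mem_reverse] at hj
      have hjl : j ∈ lens := by rw [htl]; simp [hj]
      have := hbound j hjl; omega)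
    (by
      intro x hx _
      rw [htl] at hx
      rcases List.mem_cons.1 hx with h | h
      · exact Or.inr h
      · exact Or.inl (by rw [List.mem_reverse]; exact h))
  obtain ⟨d', hfold, hkeys', t', ht'1, hval', hbelow'⟩ := hds
  have ht'eq : t' = 1 := by
    by_contra hne
    have := hbelow' 1 h1mem (by omega)
    omega
  rw [slice_tail_reverse lens]
  show (match (lens.drop 1).reverse.foldl dpStep (some d1) with
    | some d => d.items
    | none => ([] : List (Int × Int))) = _
  have hdrop : (lens.drop 1) = tl := by rw [htl]; rfl
  rw [hdrop, hfold]
  show d'.items = _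
  rw [items_eq_keys_map d' (hkeys' ▸ hlnd), hkeys']
  apply List.map_congr_left
  intro k hk
  have hgd : d'.getD k 0 = pcF N k := by
    rw [PySem.Dict.getD_eq_get?_getD, hval' k, if_pos hk, ht'eq, pcGE_one_eq_pcF]
    rfl
  rw [hgd]

theorem a_eq (N : Int) (h0 : 0 ≤ N) :
    interval_frequencies N = (relevantCases N).map (fun k => (k, pcF N k)) := by
  obtain ⟨F, hFl, hFnd, hFmem, hFpos⟩ := relevantCases_spec N h0
  have hperm : (relevantCases N).Perm F := by rw [hFl]; exact PySem.List.sorted_perm F _ _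
  have hlnd : (relevantCases N).Nodup := hperm.nodup_iff.2 hFnd
  have hple : (relevantCases N).Pairwise (· ≤ ·) := by
    rw [hFl]
    exact PySem.List.sorted_pairwise F (fun x => x)
  have hplt : (relevantCases N).Pairwise (· < ·) :=
    (hple.and hlnd).imp (fun h => lt_of_le_of_ne h.1 h.2)
  exact a_core N h0 (relevantCases N) hlnd
    (fun k => by rw [hperm.mem_iff]; exact hFmem k)
    (fun k hk => hFpos k (hperm.subset hk)) hplt

theorem main_eq (N : Int) (h0 : 0 ≤ N) :
    interval_frequencies N = interval_frequencies_alt N := by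
  rw [a_eq N h0, alt_eq N h0]
  obtain ⟨F, hFl, hFnd, hFmem, _⟩ := relevantCases_spec N h0
  rw [hFl]
  have hperm : F.Perm (dF N).keys := by
    apply (List.perm_ext_iff_of_nodup hFnd (dF_keys_nodup N)).mpr
    intro a
    rw [hFmem a, dF_mem_keys N a h0]
  rw [PySem.List.sorted_eq_sorted_of_perm F (dF N).keys (fun x => x) (fun _ _ h => h) hperm]


-- ===== VERDICT (by name: the statement is the Claim_ definition above) =====
theorem interval_frequencies_spec : Claim_equal_interval_frequencies := by
  intro N _ hpre
  exact main_eq N hpre
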